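-- pv_equiv track=rewrite | github.com/u9401066/atomic-workflow | src/atomic_workflow/parser/baseline_parser.py | _split_step_sections
-- ===== SOURCE A (Python) =====
-- def _split_step_sections(text: str) -> list[tuple[str, list[str]]]:
--     sections: list[tuple[str, list[str]]] = []
--     current_heading: str | None = None
--     current_body: list[str] = []
--
--     for line in text.splitlines():
--         if line.startswith("### "):
--             if current_heading is not None:
--                 sections.append((current_heading, current_body))
--             current_heading = line
--             current_body = []
--             continue
--         if current_heading is not None:
--             current_body.append(line)
--
--     if current_heading is not None:
--         sections.append((current_heading, current_body))
--
--     return sections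
-- ===== SOURCE B (Python) =====
-- def _split_step_sections(text):
--     lines = text.splitlines()
--     heads = [(i, line) for i, line in enumerate(lines) if line.startswith("### ")]
--     bounds = [i for i, _ in heads[1:]] + [len(lines)]
--     return [(line, lines[h + 1:nxt]) for (h, line), nxt in zip(heads, bounds)]
-- ===== Notes on version B (the rewrite author's own statement) =====
-- stated objective: alternative
-- what changed: Replaces the single stateful accumulator loop (current heading/body rebuilt line by line) with a two-phase pass: first collect the (index, line) pairs of all heading lines via enumerate, then pair each heading with the next heading's index (or len(lines)) and emit the body as a slice lines[h+1:next].
import Mathlib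
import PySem

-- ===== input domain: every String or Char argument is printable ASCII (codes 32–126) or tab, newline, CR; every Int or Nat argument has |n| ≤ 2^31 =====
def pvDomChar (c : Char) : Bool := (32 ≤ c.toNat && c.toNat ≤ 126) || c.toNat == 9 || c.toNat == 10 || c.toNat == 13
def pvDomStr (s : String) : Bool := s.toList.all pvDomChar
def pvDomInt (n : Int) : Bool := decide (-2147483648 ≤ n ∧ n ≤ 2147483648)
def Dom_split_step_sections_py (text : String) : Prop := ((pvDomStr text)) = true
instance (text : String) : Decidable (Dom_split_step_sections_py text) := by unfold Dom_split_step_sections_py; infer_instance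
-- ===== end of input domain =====

-- B replaces A's single stateful accumulator loop with a two-phase pass: collect heading
-- positions first, then emit each heading with its body as a slice up to the next heading.

-- ===== PORT A =====
-- loop body of A's for-loop, as a named helper
def stepA (st : List (String × List String) × Option String × List String) (line : String) :
    List (String × List String) × Option String × List String :=
  if PySem.Str.startswith line "### " then
    match st.2.1 with
    | some h => (st.1 ++ [(h, st.2.2)], some line, ([] : List String))
    | none => (st.1, some line, ([] : List String))
  else
    match st.2.1 with
    | some _ => (st.1, st.2.1, st.2.2 ++ [line])
    | none => st

-- A's trailing 'if current_heading is not None: sections.append(...)'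
def finishA (st : List (String × List String) × Option String × List String) :
    List (String × List String) :=
  match st.2.1 with
  | some h => st.1 ++ [(h, st.2.2)]
  | none => st.1

def split_step_sections_py (text : String) : List (String × List String) :=
  finishA ((PySem.Str.splitlines text).foldl stepA ([], none, []))

-- ===== PORT B =====
-- phase 1: '[(i, line) for i, line in enumerate(lines) if line.startswith("### ")]'
def headsB (lines : List String) : List (Int × String) :=
  (PySem.List.enumerate lines 0).filter (fun p => PySem.Str.startswith p.2 "### ")

-- phase 2: 'bounds = [i for i, _ in heads[1:]] + [len(lines)]' and the zip comprehension
def emitB (lines : List String) (hs : List (Int × String)) : List (String × List String) :=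
  (hs.zip ((hs.drop 1).map (fun p => p.1) ++ [(lines.length : Int)])).map
    (fun p => (p.1.2, PySem.List.slice lines (some (p.1.1 + 1)) (some p.2)))

def split_step_sections_py_alt (text : String) : List (String × List String) :=
  let lines := PySem.Str.splitlines text
  emitB lines (headsB lines)

-- ===== PRECONDITION & SPEC =====
def Spec_split_step_sections_py (text : String) (out : List (String × List String)) : Prop := out = split_step_sections_py_alt text
instance (text : String) (out : List (String × List String)) : Decidable (Spec_split_step_sections_py text out) := by unfold Spec_split_step_sections_py; infer_instance

-- ===== CLAIM (what is proved, stated in full; the proofs are below) =====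
def Claim_equal_split_step_sections_py : Prop := ∀ (text : String), Dom_split_step_sections_py text → Spec_split_step_sections_py text (split_step_sections_py text)

-- ===== LEMMAS AND PROOFS =====

def isH (l : String) : Bool := PySem.Str.startswith l "### "

-- sections emitted by A's loop once heading h with accumulated body b is current
def secG (h : String) (b : List String) : List String → List (String × List String)
  | [] => [(h, b)]
  | l :: ls => if isH l then (h, b) :: secG l [] ls else secG h (b ++ [l]) ls

-- sections of a line list from the initial (no current heading) state
def secF0 : List String → List (String × List String)
  | [] => []
  | l :: ls => if isH l then secG l [] ls else secF0 ls

lemma loopA_some (ls : List String) (secs : List (String × List String)) (h : String)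
    (b : List String) :
    finishA (ls.foldl stepA (secs, some h, b)) = secs ++ secG h b ls := by
  induction ls generalizing secs h b with
  | nil => simp [finishA, secG]
  | cons l ls ih =>
    have hr : PySem.Str.startswith l "### " = isH l := rfl
    by_cases hl : isH l = true
    · simp only [List.foldl_cons, stepA, hr, hl, if_true]
      rw [ih]
      simp [secG, hl]
    · rw [Bool.not_eq_true] at hl
      simp only [List.foldl_cons, stepA, hr, hl, Bool.false_eq_true, if_false]
      rw [ih]
      simp [secG, hl]

lemma loopA_none (ls : List String) (secs : List (String × List String)) :
    finishA (ls.foldl stepA (secs, none, [])) = secs ++ secF0 ls := by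
  induction ls generalizing secs with
  | nil => simp [finishA, secF0]
  | cons l ls ih =>
    have hr : PySem.Str.startswith l "### " = isH l := rfl
    by_cases hl : isH l = true
    · simp only [List.foldl_cons, stepA, hr, hl, if_true]
      rw [loopA_some]
      simp [secF0, hl]
    · rw [Bool.not_eq_true] at hl
      simp only [List.foldl_cons, stepA, hr, hl, Bool.false_eq_true, if_false]
      rw [ih]
      simp [secF0, hl]

lemma secG_eq (h : String) (b ls : List String) :
    secG h b ls = (h, b ++ ls.takeWhile (fun x => !isH x)) ::
      secF0 (ls.dropWhile (fun x => !isH x)) := by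
  induction ls generalizing h b with
  | nil => simp [secG, secF0]
  | cons l ls ih =>
    by_cases hl : isH l = true
    · simp [secG, secF0, hl]
    · rw [Bool.not_eq_true] at hl
      simp [secG, hl, ih]

lemma secF0_dropWhile (ls : List String) :
    secF0 (ls.dropWhile (fun x => !isH x)) = secF0 ls := by
  induction ls with
  | nil => rfl
  | cons l ls ih =>
    by_cases hl : isH l = true
    · simp [hl]
    · rw [Bool.not_eq_true] at hl
      simp [hl, secF0, ih]

lemma enumerate_shift (ls : List String) (s : Int) :
    PySem.List.enumerate ls (s + 1) =
      (PySem.List.enumerate ls s).map (fun p => (p.1 + 1, p.2)) := by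
  induction ls generalizing s with
  | nil => simp [PySem.List.enumerate_nil]
  | cons l ls ih =>
    rw [PySem.List.enumerate_cons, PySem.List.enumerate_cons]
    rw [show s + 1 + 1 = (s + 1) + 1 from rfl, ih]
    simp

lemma headsB_cons (l : String) (ls : List String) :
    headsB (l :: ls) = (if isH l then [((0 : Int), l)] else []) ++
      (headsB ls).map (fun p => (p.1 + 1, p.2)) := by
  have hr : (fun p : Int × String => PySem.Str.startswith p.2 "### ") =
      (fun p : Int × String => isH p.2) := rfl
  unfold headsB
  rw [PySem.List.enumerate_cons, show (0 : Int) + 1 = 0 + 1 from rfl, enumerate_shift, hr]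
  by_cases hl : isH l = true
  · simp [hl, List.filter_map, Function.comp_def]
  · rw [Bool.not_eq_true] at hl
    simp [hl, List.filter_map, Function.comp_def]

lemma headsB_nonneg (ls : List String) : ∀ p ∈ headsB ls, 0 ≤ p.1 := by
  induction ls with
  | nil => intro p hp; simp [headsB, PySem.List.enumerate_nil] at hp
  | cons l ls ih =>
    intro p hp
    rw [headsB_cons] at hp
    rcases List.mem_append.1 hp with h1 | h2
    · by_cases hl : isH l = true
      · simp [hl] at h1; simp [h1]
      · rw [Bool.not_eq_true] at hl; simp [hl] at h1
    · rcases List.mem_map.1 h2 with ⟨q, hq, rfl⟩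
      have := ih q hq
      simp; omega

lemma slice_cons_shift (l : String) (ls : List String) (a b : Int) (ha : 0 ≤ a) (hb : 0 ≤ b) :
    PySem.List.slice (l :: ls) (some (a + 1)) (some (b + 1)) =
      PySem.List.slice ls (some a) (some b) := by
  rw [PySem.List.slice_toNat _ (by omega) (by omega), PySem.List.slice_toNat _ ha hb]
  have h1 : (a + 1).toNat = a.toNat + 1 := by omega
  have h2 : (b + 1).toNat = b.toNat + 1 := by omega
  rw [h1, h2]
  simp [List.drop_succ_cons]

lemma emitB_nil (lines : List String) : emitB lines [] = [] := rfl

lemma emitB_cons (lines : List String) (x : Int × String) (hs : List (Int × String)) :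
    emitB lines (x :: hs) =
      (x.2, PySem.List.slice lines (some (x.1 + 1))
        (some (match hs with | [] => ((lines.length : Int)) | y :: _ => y.1))) ::
      emitB lines hs := by
  cases hs with
  | nil => rfl
  | cons y hs' => rfl

lemma emitB_shift (l : String) (ls : List String) (hs : List (Int × String))
    (h0 : ∀ p ∈ hs, 0 ≤ p.1) :
    emitB (l :: ls) (hs.map (fun p => (p.1 + 1, p.2))) = emitB ls hs := by
  induction hs with
  | nil => rfl
  | cons x hs ih =>
    have hx : 0 ≤ x.1 := h0 x (List.mem_cons_self ..)
    rw [List.map_cons, emitB_cons, emitB_cons,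
      ih (fun p hp => h0 p (List.mem_cons_of_mem _ hp))]
    congr 1
    cases hs with
    | nil =>
      show (x.2, PySem.List.slice (l :: ls) (some (x.1 + 1 + 1))
          (some ((l :: ls).length : Int))) =
        (x.2, PySem.List.slice ls (some (x.1 + 1)) (some (ls.length : Int)))
      have hlen : ((l :: ls).length : Int) = (ls.length : Int) + 1 := by simp
      rw [hlen, show x.1 + 1 + 1 = (x.1 + 1) + 1 from rfl,
        slice_cons_shift l ls (x.1 + 1) (ls.length : Int) (by omega) (by positivity)]
    | cons y hs' =>
      have hy : 0 ≤ y.1 := h0 y (List.mem_cons_of_mem _ (List.mem_cons_self ..))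
      show (x.2, PySem.List.slice (l :: ls) (some (x.1 + 1 + 1)) (some (y.1 + 1))) =
        (x.2, PySem.List.slice ls (some (x.1 + 1)) (some y.1))
      rw [show x.1 + 1 + 1 = (x.1 + 1) + 1 from rfl,
        slice_cons_shift l ls (x.1 + 1) y.1 (by omega) hy]

lemma headsB_eq_nil (ls : List String) (h : headsB ls = []) :
    ls.takeWhile (fun x => !isH x) = ls := by
  induction ls with
  | nil => rfl
  | cons l ls ih =>
    rw [headsB_cons] at h
    by_cases hl : isH l = true
    · simp [hl] at h
    · rw [Bool.not_eq_true] at hl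
      simp [hl, List.map_eq_nil_iff] at h
      simp [hl, ih h]

lemma headsB_first_idx (ls : List String) (i : Int) (x : String) (hs : List (Int × String))
    (h : headsB ls = (i, x) :: hs) :
    i = ((ls.takeWhile (fun y => !isH y)).length : Int) := by
  induction ls generalizing i x hs with
  | nil => simp [headsB, PySem.List.enumerate_nil] at h
  | cons l ls ih =>
    rw [headsB_cons] at h
    by_cases hl : isH l = true
    · simp only [hl, if_true, List.singleton_append, List.cons.injEq, Prod.mk.injEq] at h
      simp [hl, ← h.1.1]
    · rw [Bool.not_eq_true] at hl
      simp only [hl, Bool.false_eq_true, if_false, List.nil_append] at h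
      cases hcase : headsB ls with
      | nil => rw [hcase] at h; simp at h
      | cons q tl =>
        rw [hcase, List.map_cons, List.cons.injEq, Prod.mk.injEq] at h
        have hq := ih q.1 q.2 tl (by rw [hcase])
        rw [List.takeWhile_cons]
        simp only [hl, Bool.not_false, if_true, List.length_cons]
        push_cast
        omega

lemma take_takeWhile_length {α : Type} (p : α → Bool) (ls : List α) :
    ls.take (ls.takeWhile p).length = ls.takeWhile p :=
  ((List.prefix_iff_eq_take).1 (List.takeWhile_prefix p)).symm

lemma B_eq_secF0 (ls : List String) : emitB ls (headsB ls) = secF0 ls := by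
  induction ls with
  | nil => rfl
  | cons l ls ih =>
    rw [headsB_cons]
    by_cases hl : isH l = true
    · simp only [hl, if_true, List.singleton_append]
      rw [emitB_cons]
      cases hcase : headsB ls with
      | nil =>
        rw [hcase] at ih
        simp only [List.map_nil, emitB_nil]
        have hni : secF0 ls = [] := by rw [← ih]; rfl
        have hsl : PySem.List.slice (l :: ls) (some ((0 : Int) + 1))
            (some ((l :: ls).length : Int)) = ls := by
          rw [PySem.List.slice_toNat _ (by omega) (by positivity)]
          simp
        rw [hsl]
        simp only [secF0, hl, if_true]
        rw [secG_eq, headsB_eq_nil ls hcase, secF0_dropWhile, hni]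
        simp
      | cons q tl =>
        have hi : q.1 = ((ls.takeWhile (fun y => !isH y)).length : Int) :=
          headsB_first_idx ls q.1 q.2 tl (by rw [hcase])
        have hnn := headsB_nonneg ls
        rw [hcase] at hnn
        simp only [List.map_cons]
        have hsl : PySem.List.slice (l :: ls) (some ((0 : Int) + 1)) (some (q.1 + 1)) =
            ls.takeWhile (fun y => !isH y) := by
          rw [slice_cons_shift l ls 0 q.1 (le_refl 0) (by omega)]
          rw [PySem.List.slice_toNat _ (le_refl 0) (by omega)]
          simp [hi, take_takeWhile_length]
        rw [hsl]
        have htail : emitB (l :: ls) ((q :: tl).map (fun p => (p.1 + 1, p.2))) =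
            emitB ls (q :: tl) := emitB_shift l ls _ hnn
        rw [List.map_cons] at htail
        rw [htail, ← hcase, ih]
        simp only [secF0, hl, if_true]
        rw [secG_eq, secF0_dropWhile]
        simp
    · rw [Bool.not_eq_true] at hl
      simp only [hl, Bool.false_eq_true, if_false, List.nil_append]
      rw [emitB_shift l ls _ (headsB_nonneg ls), ih]
      simp [secF0, hl]

-- ===== VERDICT (by name: the statement is the Claim_ definition above) =====
theorem split_step_sections_py_spec : Claim_equal_split_step_sections_py := by
  intro text _
  unfold Spec_split_step_sections_py split_step_sections_py split_step_sections_py_alt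
  rw [loopA_none, B_eq_secF0]
  rfl
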